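-- pv_equiv track=rewrite | github.com/gewurztraminerrr-cloud/Morpheme | generator/checkerboard_v3.py | find_all_word_occurrences
-- ===== SOURCE A (Python) =====
-- from typing import List, Set, Tuple, Dict, Optional
-- from collections import Counter
--
-- def find_all_word_occurrences(grid: List[List[str]], word_set: Set[str], prefixes: Set[str]) -> Counter:
--     """Find all words in the grid and count occurrences."""
--     height = len(grid)
--     width = len(grid[0]) if height > 0 else 0
--     word_counts = Counter()
--
--     def dfs(i: int, j: int, current_word: str, path: Set[Tuple[int, int]]):
--         if current_word and current_word not in prefixes and current_word not in word_set:
--             return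
--         if len(current_word) >= 3 and current_word in word_set:
--             word_counts[current_word] += 1
--         if len(current_word) >= 16:
--             return
--         for di in [-1, 0, 1]:
--             for dj in [-1, 0, 1]:
--                 if di == 0 and dj == 0:
--                     continue
--                 ni, nj = i + di, j + dj
--                 if 0 <= ni < height and 0 <= nj < width and (ni, nj) not in path:
--                     dfs(ni, nj, current_word + grid[ni][nj], path | {(ni, nj)})
--
--     for i in range(height):
--         for j in range(width):
--             dfs(i, j, grid[i][j], {(i, j)})
--     return word_counts
-- ===== SOURCE B (Python) =====
-- from collections import Counter
--
--
-- def find_all_word_occurrences(grid, word_set, prefixes):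
--     """Iterative rewrite: explicit LIFO stack of frames collects the found
--     words in DFS order into a list; the Counter is built once at the end."""
--     height = len(grid)
--     width = len(grid[0]) if height > 0 else 0
--     found = []
--     # seeds pushed in reverse reading order so the pop order is reading order
--     stack = [(i, j, grid[i][j], {(i, j)})
--              for i in reversed(range(height)) for j in reversed(range(width))]
--     while stack:
--         i, j, word, path = stack.pop()
--         if word and word not in prefixes and word not in word_set:
--             continue
--         if len(word) >= 3 and word in word_set:
--             found.append(word)
--         if len(word) >= 16:
--             continue
--         for di in (1, 0, -1):  # pushed reversed: popped in (-1, 0, 1) order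
--             for dj in (1, 0, -1):
--                 if di == 0 and dj == 0:
--                     continue
--                 ni, nj = i + di, j + dj
--                 if 0 <= ni < height and 0 <= nj < width and (ni, nj) not in path:
--                     stack.append((ni, nj, word + grid[ni][nj], path | {(ni, nj)}))
--     return Counter(found)
-- ===== Notes on version B (the rewrite author's own statement) =====
-- stated objective: alternative
-- what changed: The recursive counter-threading DFS is replaced by an explicit LIFO stack of frames that collects the found words into a list (seeds and neighbours pushed in reverse so pop order equals A's recursion order), with the Counter built once from that list at the end.
import Mathlib
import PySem

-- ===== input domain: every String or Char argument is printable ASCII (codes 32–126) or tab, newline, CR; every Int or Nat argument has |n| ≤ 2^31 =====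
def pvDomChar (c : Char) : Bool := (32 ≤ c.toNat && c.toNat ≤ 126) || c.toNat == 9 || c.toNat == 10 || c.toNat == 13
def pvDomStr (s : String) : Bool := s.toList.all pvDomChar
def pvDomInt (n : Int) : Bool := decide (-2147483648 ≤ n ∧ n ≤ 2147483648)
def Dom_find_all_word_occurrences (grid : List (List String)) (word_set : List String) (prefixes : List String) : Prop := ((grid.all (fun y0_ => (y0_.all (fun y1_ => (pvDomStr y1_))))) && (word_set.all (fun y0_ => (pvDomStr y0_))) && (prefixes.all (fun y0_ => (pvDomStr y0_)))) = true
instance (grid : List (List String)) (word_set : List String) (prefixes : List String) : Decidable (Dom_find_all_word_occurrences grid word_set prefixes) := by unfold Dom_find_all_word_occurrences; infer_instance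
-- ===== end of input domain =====

-- B rewrites the recursive counter-threading DFS as an explicit-stack loop that collects
-- the found words in a list and builds the Counter once at the end (objective: alternative).

-- grid[i][j] (both ports index only after checking 0 ≤ i < height, 0 ≤ j < width, so the
-- total form pyGetD is exact there; Pre_ excludes grids on which Python's indexing raises)
def pvCell (grid : List (List String)) (i j : Int) : List Char :=
  (PySem.List.pyGetD (PySem.List.pyGetD grid i []) j "").toList

-- ===== PORT A =====
-- the nested recursive dfs; the Nat fuel is only a totality guard (the top-level call
-- supplies fuel larger than any possible path length, so the 0 branch is never reached)
def pvDfsA (grid : List (List String)) (wset pset : List (List Char)) (h w : Int)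
    (fuel : Nat) (i j : Int) (cw : List Char) (path : PySem.Set (Int × Int))
    (counts : PySem.Dict String Int) : PySem.Dict String Int :=
  if cw ≠ [] ∧ ¬ pset.contains cw ∧ ¬ wset.contains cw then counts
  else
    let counts1 := if 3 ≤ cw.length ∧ wset.contains cw then counts.modify (String.ofList cw) 0 (· + 1) else counts
    if 16 ≤ cw.length then counts1
    else
      match fuel with
      | 0 => counts1
      | f + 1 =>
        ([-1, 0, 1] : List Int).foldl (fun c di =>
          ([-1, 0, 1] : List Int).foldl (fun c dj =>
            if di = 0 ∧ dj = 0 then c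
            else
              let ni := i + di
              let nj := j + dj
              if 0 ≤ ni ∧ ni < h ∧ 0 ≤ nj ∧ nj < w ∧ ¬ PySem.Set.contains path (ni, nj) then
                pvDfsA grid wset pset h w f ni nj (cw ++ pvCell grid ni nj)
                  (PySem.Set.add path (ni, nj)) c
              else c) c) counts1

def find_all_word_occurrences (grid : List (List String)) (word_set : List String) (prefixes : List String) : List (String × Int) :=
  let height : Int := grid.length
  let width : Int := if 0 < height then ((PySem.List.pyGetD grid 0 []).length : Int) else 0
  let fuel : Nat := grid.length * (PySem.List.pyGetD grid 0 []).length + 1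
  let wset := word_set.map String.toList
  let pset := prefixes.map String.toList
  ((PySem.List.pyRange 0 height 1).foldl (fun counts i =>
    (PySem.List.pyRange 0 width 1).foldl (fun counts j =>
      pvDfsA grid wset pset height width fuel i j (pvCell grid i j)
        (PySem.Set.ofList [(i, j)]) counts) counts) PySem.Dict.empty).items

-- ===== PORT B =====
-- Source B pushes the 8 directions in descending order onto the LIFO stack, so they are popped
-- in ascending order: on a head-is-top stack that is exactly prepending this ascending list.
def pvDirs : List (Int × Int) := [(-1,-1),(-1,0),(-1,1),(0,-1),(0,1),(1,-1),(1,0),(1,1)]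

def pvKids (grid : List (List String)) (h w : Int) (i j : Int) (cw : List Char)
    (path : PySem.Set (Int × Int)) : List (Int × Int × List Char × PySem.Set (Int × Int)) :=
  pvDirs.filterMap (fun d =>
    let ni := i + d.1
    let nj := j + d.2
    if 0 ≤ ni ∧ ni < h ∧ 0 ≤ nj ∧ nj < w ∧ ¬ PySem.Set.contains path (ni, nj) then
      some (ni, nj, cw ++ pvCell grid ni nj, PySem.Set.add path (ni, nj))
    else none)

def pvMeasure : List (Nat × Int × Int × List Char × PySem.Set (Int × Int)) → Nat
  | [] => 0
  | (f, _) :: rest => 9 ^ f + pvMeasure rest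

theorem pvMeasure_append (a b : List (Nat × Int × Int × List Char × PySem.Set (Int × Int))) :
    pvMeasure (a ++ b) = pvMeasure a + pvMeasure b := by
  induction a with
  | nil => simp [pvMeasure]
  | cons x xs ih => obtain ⟨f, fr⟩ := x; simp [pvMeasure, ih]; omega

theorem pvMeasure_map (l : List (Int × Int × List Char × PySem.Set (Int × Int))) (f : Nat) :
    pvMeasure (l.map (fun fr => (f, fr))) = l.length * 9 ^ f := by
  induction l with
  | nil => simp [pvMeasure]
  | cons x xs ih => simp [pvMeasure, ih]; ring

-- the stack loop of Source B; per-frame Nat fuel is only a totality guard, as in port A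
def pvExec (grid : List (List String)) (wset pset : List (List Char)) (h w : Int) :
    List (Nat × Int × Int × List Char × PySem.Set (Int × Int)) → List (List Char) → List (List Char)
  | [], found => found
  | (fuel, i, j, cw, path) :: rest, found =>
    if cw ≠ [] ∧ ¬ pset.contains cw ∧ ¬ wset.contains cw then pvExec grid wset pset h w rest found
    else
      let found1 := if 3 ≤ cw.length ∧ wset.contains cw then found ++ [cw] else found
      if 16 ≤ cw.length then pvExec grid wset pset h w rest found1
      else
        match fuel with
        | 0 => pvExec grid wset pset h w rest found1
        | f + 1 =>
          pvExec grid wset pset h w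
            ((pvKids grid h w i j cw path).map (fun fr => (f, fr)) ++ rest) found1
  termination_by stack _ => pvMeasure stack
  decreasing_by
  all_goals simp [pvMeasure, pvMeasure_append, pvMeasure_map]
  all_goals
    have h1 : (pvKids grid h w i j cw path).length ≤ 8 := by
      have := List.length_filterMap_le (fun d : Int × Int =>
        let ni := i + d.1
        let nj := j + d.2
        if 0 ≤ ni ∧ ni < h ∧ 0 ≤ nj ∧ nj < w ∧ ¬ PySem.Set.contains path (ni, nj) then
          some (ni, nj, cw ++ pvCell grid ni nj, PySem.Set.add path (ni, nj))
        else none) pvDirs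
      simpa [pvKids, pvDirs] using this
    have h2 : (9:Nat) ^ (f + 1) = 9 * 9 ^ f := by ring
    have h3 := Nat.mul_le_mul_right (9 ^ f) h1
    have h4 : 0 < (9:Nat) ^ f := by positivity
    omega

def find_all_word_occurrences_alt (grid : List (List String)) (word_set : List String) (prefixes : List String) : List (String × Int) :=
  let height : Int := grid.length
  let width : Int := if 0 < height then ((PySem.List.pyGetD grid 0 []).length : Int) else 0
  let fuel : Nat := grid.length * (PySem.List.pyGetD grid 0 []).length + 1
  let wset := word_set.map String.toList
  let pset := prefixes.map String.toList
  let stack := (PySem.List.pyRange 0 height 1).flatMap (fun i =>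
    (PySem.List.pyRange 0 width 1).map (fun j => (fuel, i, j, pvCell grid i j, PySem.Set.ofList [(i, j)])))
  (PySem.Dict.counter ((pvExec grid wset pset height width stack []).map String.ofList)).items

-- ===== PRECONDITION & SPEC =====
-- Pre_ excludes exactly the grids on which Python A raises IndexError: a row shorter than
-- row 0 makes grid[i][j] fail for some j < width.
def Pre_find_all_word_occurrences (grid : List (List String)) (word_set : List String) (prefixes : List String) : Prop :=
  ∀ row ∈ grid, (grid.headD []).length ≤ row.length
instance (grid : List (List String)) (word_set : List String) (prefixes : List String) : Decidable (Pre_find_all_word_occurrences grid word_set prefixes) := by unfold Pre_find_all_word_occurrences; infer_instance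

def pvWitness_find_all_word_occurrences : List (List String) × List String × List String :=
  ([["c", "a"], ["t", "a"]], ["cat"], ["c", "ca"])

def Spec_find_all_word_occurrences (grid : List (List String)) (word_set : List String) (prefixes : List String) (out : List (String × Int)) : Prop := out = find_all_word_occurrences_alt grid word_set prefixes
instance (grid : List (List String)) (word_set : List String) (prefixes : List String) (out : List (String × Int)) : Decidable (Spec_find_all_word_occurrences grid word_set prefixes out) := by unfold Spec_find_all_word_occurrences; infer_instance

-- ===== CLAIM (what is proved, stated in full; the proofs are below) =====
def Claim_equal_find_all_word_occurrences : Prop := ∀ (grid : List (List String)) (word_set : List String) (prefixes : List String), Dom_find_all_word_occurrences grid word_set prefixes → Pre_find_all_word_occurrences grid word_set prefixes → Spec_find_all_word_occurrences grid word_set prefixes (find_all_word_occurrences grid word_set prefixes)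

-- ===== LEMMAS AND PROOFS =====

-- the list of words the DFS finds from one frame, in discovery order (proof-side spec)
def pvWords (grid : List (List String)) (wset pset : List (List Char)) (h w : Int) :
    Nat → Int × Int × List Char × PySem.Set (Int × Int) → List (List Char)
  | fuel, (i, j, cw, path) =>
    if cw ≠ [] ∧ ¬ pset.contains cw ∧ ¬ wset.contains cw then []
    else
      (if 3 ≤ cw.length ∧ wset.contains cw then [cw] else []) ++
      (if 16 ≤ cw.length then []
       else match fuel with
         | 0 => []
         | f + 1 => (pvKids grid h w i j cw path).flatMap (fun fr => pvWords grid wset pset h w f fr))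

def pvBump (d : PySem.Dict String Int) (cw : List Char) : PySem.Dict String Int :=
  d.modify (String.ofList cw) 0 (· + 1)

theorem pv_foldl_filterMap {β γ α : Type} (l : List β) (g : β → Option γ) (step : α → γ → α) :
    ∀ c0, (l.filterMap g).foldl step c0
      = l.foldl (fun c x => match g x with | some y => step c y | none => c) c0 := by
  induction l with
  | nil => intro c0; simp
  | cons x xs ih =>
    intro c0
    cases hx : g x <;> simp [hx, ih]

theorem pv_match_ite {α γ : Type} (P : Prop) [Decidable P] (a : γ) (step : γ → α) (c : α) :
    (match (if P then some a else none) with | some y => step y | none => c)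
      = if P then step a else c := by
  by_cases h : P <;> simp [h]

theorem pv_dirs_flat {α : Type} (g : α → Int → Int → α) (c0 : α) :
    ([-1, 0, 1] : List Int).foldl (fun c di =>
      ([-1, 0, 1] : List Int).foldl (fun c dj =>
        if di = 0 ∧ dj = 0 then c else g c di dj) c) c0
    = pvDirs.foldl (fun c d => g c d.1 d.2) c0 := by
  simp [pvDirs, List.foldl]

-- the double direction loop of A's dfs is a fold over the child-frame list pvKids
theorem pv_dirs_to_kids {α : Type} (grid : List (List String)) (h w : Int) (i j : Int)
    (cw : List Char) (path : PySem.Set (Int × Int))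
    (step : α → (Int × Int × List Char × PySem.Set (Int × Int)) → α) (c0 : α) :
    ([-1, 0, 1] : List Int).foldl (fun c di =>
      ([-1, 0, 1] : List Int).foldl (fun c dj =>
        if di = 0 ∧ dj = 0 then c
        else
          let ni := i + di
          let nj := j + dj
          if 0 ≤ ni ∧ ni < h ∧ 0 ≤ nj ∧ nj < w ∧ ¬ PySem.Set.contains path (ni, nj) then
            step c (ni, nj, cw ++ pvCell grid ni nj, PySem.Set.add path (ni, nj))
          else c) c) c0
    = (pvKids grid h w i j cw path).foldl step c0 := by
  calc _ = pvDirs.foldl (fun c d =>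
        if 0 ≤ i + d.1 ∧ i + d.1 < h ∧ 0 ≤ j + d.2 ∧ j + d.2 < w ∧
            ¬ PySem.Set.contains path (i + d.1, j + d.2) then
          step c (i + d.1, j + d.2, cw ++ pvCell grid (i + d.1) (j + d.2),
            PySem.Set.add path (i + d.1, j + d.2))
        else c) c0 :=
      pv_dirs_flat (fun c di dj =>
        if 0 ≤ i + di ∧ i + di < h ∧ 0 ≤ j + dj ∧ j + dj < w ∧
            ¬ PySem.Set.contains path (i + di, j + dj) then
          step c (i + di, j + dj, cw ++ pvCell grid (i + di) (j + dj),
            PySem.Set.add path (i + di, j + dj))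
        else c) c0
    _ = (pvKids grid h w i j cw path).foldl step c0 := by
      rw [pvKids, pv_foldl_filterMap]
      congr 1
      funext c d
      dsimp only
      exact (pv_match_ite _ _ (step c) c).symm

-- A's counter-threading DFS is the bump-fold over the word list
theorem pvDfsA_eq_foldl (grid : List (List String)) (wset pset : List (List Char)) (h w : Int) :
    ∀ (fuel : Nat) (i j : Int) (cw : List Char) (path : PySem.Set (Int × Int))
      (counts : PySem.Dict String Int),
      pvDfsA grid wset pset h w fuel i j cw path counts
        = (pvWords grid wset pset h w fuel (i, j, cw, path)).foldl pvBump counts := by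
  intro fuel
  induction fuel with
  | zero =>
    intro i j cw path counts
    rw [pvDfsA, pvWords]
    by_cases hp : cw ≠ [] ∧ ¬ pset.contains cw = true ∧ ¬ wset.contains cw = true
    · rw [if_pos hp, if_pos hp]; rfl
    · rw [if_neg hp, if_neg hp]
      dsimp only
      by_cases hh : 3 ≤ cw.length ∧ wset.contains cw = true <;>
        [rw [if_pos hh, if_pos hh]; rw [if_neg hh, if_neg hh]] <;>
        by_cases hc : 16 ≤ cw.length <;>
        [rw [if_pos hc, if_pos hc]; rw [if_neg hc, if_neg hc]; rw [if_pos hc, if_pos hc];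
          rw [if_neg hc, if_neg hc]] <;>
        simp [pvBump]
  | succ f ih =>
    intro i j cw path counts
    rw [pvDfsA, pvWords]
    by_cases hp : cw ≠ [] ∧ ¬ pset.contains cw = true ∧ ¬ wset.contains cw = true
    · rw [if_pos hp, if_pos hp]; rfl
    · rw [if_neg hp, if_neg hp]
      dsimp only
      by_cases hc : 16 ≤ cw.length
      · rw [if_pos hc, if_pos hc]
        by_cases hh : 3 ≤ cw.length ∧ wset.contains cw = true <;>
          [rw [if_pos hh, if_pos hh]; rw [if_neg hh, if_neg hh]] <;> simp [pvBump]
      · rw [if_neg hc, if_neg hc]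
        calc _ = (pvKids grid h w i j cw path).foldl
              (fun c fr => pvDfsA grid wset pset h w f fr.1 fr.2.1 fr.2.2.1 fr.2.2.2 c)
              (if 3 ≤ cw.length ∧ wset.contains cw = true then
                counts.modify (String.ofList cw) 0 (· + 1) else counts) :=
            pv_dirs_to_kids grid h w i j cw path _ _
          _ = _ := by
            simp only [ih]
            have heta : (fun (fr : Int × Int × List Char × PySem.Set (Int × Int)) =>
                pvWords grid wset pset h w f (fr.1, fr.2.1, fr.2.2.1, fr.2.2.2))
                = fun fr => pvWords grid wset pset h w f fr := rfl
            rw [show (fun (c : PySem.Dict String Int) fr =>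
                List.foldl pvBump c (pvWords grid wset pset h w f (fr.1, fr.2.1, fr.2.2.1, fr.2.2.2)))
                = fun c fr => List.foldl pvBump c (pvWords grid wset pset h w f fr) from rfl]
            rw [← List.foldl_flatMap, List.foldl_append]
            by_cases hh : 3 ≤ cw.length ∧ wset.contains cw = true <;>
              [rw [if_pos hh, if_pos hh]; rw [if_neg hh, if_neg hh]] <;> simp [pvBump]

theorem pvWords_unfold (grid : List (List String)) (wset pset : List (List Char)) (h w : Int)
    (fuel : Nat) (i j : Int) (cw : List Char) (path : PySem.Set (Int × Int)) :
    pvWords grid wset pset h w fuel (i, j, cw, path)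
      = if cw ≠ [] ∧ ¬ pset.contains cw = true ∧ ¬ wset.contains cw = true then []
        else
          (if 3 ≤ cw.length ∧ wset.contains cw = true then [cw] else []) ++
          (if 16 ≤ cw.length then []
           else match fuel with
             | 0 => []
             | f + 1 => (pvKids grid h w i j cw path).flatMap
                 (fun fr => pvWords grid wset pset h w f fr)) := by
  cases fuel <;> rfl

-- the stack loop produces the concatenation of the per-frame word lists
theorem pvExec_eq (grid : List (List String)) (wset pset : List (List Char)) (h w : Int) :
    ∀ (stack : List (Nat × Int × Int × List Char × PySem.Set (Int × Int))) (found : List (List Char)),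
      pvExec grid wset pset h w stack found
        = found ++ stack.flatMap (fun e => pvWords grid wset pset h w e.1 e.2) := by
  intro stack found
  induction stack, found using pvExec.induct grid wset pset h w with
  | case1 found => simp [pvExec]
  | case2 fuel i j cw path rest found hp ih =>
    rw [pvExec, if_pos hp, ih]
    simp only [List.flatMap_cons]
    rw [pvWords_unfold, if_pos hp]
    simp
  | case3 fuel i j cw path rest found hp found1 hc ih =>
    rw [pvExec, if_neg hp]
    dsimp only
    rw [if_pos hc]
    have hf : (if 3 ≤ cw.length ∧ wset.contains cw = true then found ++ [cw] else found) = found1 := rfl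
    rw [hf, ih]
    simp only [List.flatMap_cons]
    rw [pvWords_unfold, if_neg hp, if_pos hc]
    simp only [← hf]
    by_cases hh : 3 ≤ cw.length ∧ wset.contains cw = true <;>
      [rw [if_pos hh, if_pos hh]; rw [if_neg hh, if_neg hh]] <;> simp
  | case4 i j cw path rest found hp found1 hc ih =>
    rw [pvExec, if_neg hp]
    dsimp only
    rw [if_neg hc]
    have hf : (if 3 ≤ cw.length ∧ wset.contains cw = true then found ++ [cw] else found) = found1 := rfl
    rw [hf, ih]
    simp only [List.flatMap_cons]
    rw [pvWords_unfold, if_neg hp, if_neg hc]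
    simp only [← hf]
    by_cases hh : 3 ≤ cw.length ∧ wset.contains cw = true <;>
      [rw [if_pos hh, if_pos hh]; rw [if_neg hh, if_neg hh]] <;> simp
  | case5 i j cw path rest found hp found1 hc f ih =>
    rw [pvExec, if_neg hp]
    dsimp only
    rw [if_neg hc]
    have hf : (if 3 ≤ cw.length ∧ wset.contains cw = true then found ++ [cw] else found) = found1 := rfl
    rw [hf, ih]
    simp only [List.flatMap_append, List.flatMap_cons, List.flatMap_map]
    rw [pvWords_unfold, if_neg hp, if_neg hc]
    simp only [← hf]
    by_cases hh : 3 ≤ cw.length ∧ wset.contains cw = true <;>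
      [rw [if_pos hh, if_pos hh]; rw [if_neg hh, if_neg hh]] <;> simp

-- ===== VERDICT (by name: the statement is the Claim_ definition above) =====
theorem find_all_word_occurrences_spec : Claim_equal_find_all_word_occurrences := by
  intro grid word_set prefixes _ _
  unfold Spec_find_all_word_occurrences find_all_word_occurrences find_all_word_occurrences_alt
  dsimp only
  rw [pvExec_eq]
  simp only [pvDfsA_eq_foldl, ← List.foldl_flatMap, List.nil_append, List.flatMap_assoc,
    List.flatMap_map, PySem.Dict.counter_eq_foldl, List.foldl_map]
  rfl
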